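-- pv_equiv track=rewrite | github.com/razvanvalca/firstadvice | core/processors.py | extract_complete_sentences
-- ===== SOURCE A (Python) =====
-- from typing import List, Tuple, Set
--
-- SENTENCE_ENDINGS: Set[str] = {'.', '!', '?', ':', ';'}
--
-- def extract_complete_sentences(buffer: str) -> Tuple[str, str]:
--     """
--     Extract complete sentences from a buffer.
--
--     Sentences are delimited by ., !, ?, :, or ;
--
--     Args:
--         buffer: Text buffer potentially containing complete sentences
--
--     Returns:
--         Tuple of (complete_sentences, remaining_buffer)
--     """
--     # Find the last sentence ending
--     last_end = -1
--     for ending in SENTENCE_ENDINGS: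
--         # Check for "ending + space" or "ending at end of string"
--         pos_with_space = buffer.rfind(ending + ' ')
--         pos_at_end = len(buffer) - 1 if buffer.endswith(ending) else -1
--
--         last_end = max(last_end, pos_with_space, pos_at_end)
--
--     if last_end >= 0:
--         # Include the sentence ending character
--         complete = buffer[:last_end + 1].strip()
--         remaining = buffer[last_end + 1:].lstrip()
--         return complete, remaining
--
--     return "", buffer
-- ===== SOURCE B (Python) =====
-- def extract_complete_sentences(buffer: str):
--     """Single reverse scan: find the last position that ends a sentence."""
--     for i in range(len(buffer) - 1, -1, -1):
--         if buffer[i] in '.!?:;' and (i == len(buffer) - 1 or buffer[i + 1] == ' '):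
--             return buffer[:i + 1].strip(), buffer[i + 1:].lstrip()
--     return "", buffer
-- ===== Notes on version B (the rewrite author's own statement) =====
-- stated objective: simpler
-- what changed: Replaces the per-delimiter loop of rfind/endswith passes (and the running max) with a single reverse scan over the characters that returns at the first position ending a sentence.
import Mathlib
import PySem

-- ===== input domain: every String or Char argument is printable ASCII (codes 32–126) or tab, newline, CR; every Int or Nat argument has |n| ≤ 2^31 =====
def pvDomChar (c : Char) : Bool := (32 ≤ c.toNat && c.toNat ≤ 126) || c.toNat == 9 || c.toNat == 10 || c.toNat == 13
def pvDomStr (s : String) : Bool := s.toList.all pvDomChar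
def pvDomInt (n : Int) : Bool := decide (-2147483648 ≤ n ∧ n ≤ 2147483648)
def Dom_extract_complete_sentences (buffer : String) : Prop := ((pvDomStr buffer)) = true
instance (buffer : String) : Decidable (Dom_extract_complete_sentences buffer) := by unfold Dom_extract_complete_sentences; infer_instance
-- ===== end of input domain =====

-- B replaces A's five rfind/endswith passes with one reverse scan over the characters (objective: simpler).

-- ===== PORT A =====
-- SENTENCE_ENDINGS (a set; A only takes a max over it, so iteration order is irrelevant)
def pvEndings : List Char := ['.', '!', '?', ':', ';']

def extract_complete_sentences (buffer : String) : String × String :=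
  let last_end : Int := pvEndings.foldl (fun last_end ending =>
      let pos_with_space := PySem.Str.rfind buffer (String.ofList [ending, ' '])
      let pos_at_end : Int :=
        if PySem.Str.endswith buffer (String.ofList [ending]) then (PySem.Str.len buffer : Int) - 1 else -1
      max (max last_end pos_with_space) pos_at_end) (-1)
  if last_end ≥ 0 then
    (PySem.Str.strip (PySem.Str.slice buffer none (some (last_end + 1))),
     PySem.Str.lstrip (PySem.Str.slice buffer (some (last_end + 1)) none))
  else ("", buffer)

-- ===== PORT B =====
-- Source B's loop test: buffer[i] in '.!?:;' and (i == len(buffer)-1 or buffer[i+1] == ' ')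
-- (getD's default is never used: the scan keeps i < len, and position i+1 is read only when i+1 < len)
def pvHit (cs : List Char) (i : Nat) : Bool :=
  (['.', '!', '?', ':', ';'] : List Char).contains (cs.getD i ' ')
    && (i + 1 == cs.length || cs.getD (i + 1) ' ' == ' ')

-- Source B's 'for i in range(len(buffer)-1, -1, -1)': scan i = k-1, k-2, …, 0
def pvScan (cs : List Char) : Nat → Option Nat
  | 0 => none
  | i + 1 => if pvHit cs i then some i else pvScan cs i

def extract_complete_sentences_alt (buffer : String) : String × String :=
  let cs := buffer.toList
  match pvScan cs cs.length with
  | some i =>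
      (PySem.Str.strip (PySem.Str.slice buffer none (some ((i : Int) + 1))),
       PySem.Str.lstrip (PySem.Str.slice buffer (some ((i : Int) + 1)) none))
  | none => ("", buffer)

-- ===== PRECONDITION & SPEC =====
def Spec_extract_complete_sentences (buffer : String) (out : String × String) : Prop := out = extract_complete_sentences_alt buffer
instance (buffer : String) (out : String × String) : Decidable (Spec_extract_complete_sentences buffer out) := by unfold Spec_extract_complete_sentences; infer_instance

-- ===== CLAIM (what is proved, stated in full; the proofs are below) =====
def Claim_equal_extract_complete_sentences : Prop := ∀ (buffer : String), Dom_extract_complete_sentences buffer → Spec_extract_complete_sentences buffer (extract_complete_sentences buffer)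

-- ===== LEMMAS AND PROOFS =====

-- rfind.go characterisation
theorem pv_go_le {s sub : List Char} {k : Nat} :
    PySem.Chars.rfind.go s sub k ≤ (k : Int) := by
  induction k with
  | zero => simp [PySem.Chars.rfind.go]; split <;> simp
  | succ j ih =>
      simp only [PySem.Chars.rfind.go]
      split
      · simp
      · exact le_trans ih (by push_cast; omega)

theorem pv_go_ge {s sub : List Char} {k j : Nat} (hj : j ≤ k)
    (h : sub.isPrefixOf (s.drop j) = true) :
    (j : Int) ≤ PySem.Chars.rfind.go s sub k := by
  induction k with
  | zero =>
      have : j = 0 := Nat.le_zero.mp hj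
      subst this; simp at h; simp [PySem.Chars.rfind.go, h]
  | succ i ih =>
      simp only [PySem.Chars.rfind.go]
      split
      · exact_mod_cast hj
      · rename_i hnp
        have : j ≤ i := by
          rcases Nat.lt_or_ge j (i+1) with h1 | h1
          · omega
          · have : j = i + 1 := by omega
            subst this; exact absurd h hnp
        exact ih this

theorem pv_go_spec {s sub : List Char} {k : Nat}
    (h : PySem.Chars.rfind.go s sub k ≠ -1) :
    ∃ j : Nat, j ≤ k ∧ PySem.Chars.rfind.go s sub k = (j : Int) ∧
      sub.isPrefixOf (s.drop j) = true := by
  induction k with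
  | zero =>
      refine ⟨0, le_refl _, ?_⟩
      simp only [PySem.Chars.rfind.go] at *
      split at h
      · simp_all
      · simp_all
  | succ i ih =>
      simp only [PySem.Chars.rfind.go] at h ⊢
      split at h
      · rename_i hp
        exact ⟨i + 1, le_refl _, by simp [hp], hp⟩
      · rename_i hnp
        rcases ih h with ⟨j, hj, he, hp⟩
        exact ⟨j, by omega, by simp [hnp, he], hp⟩

-- two-character prefix-of-drop ↔ the two characters at positions j, j+1
theorem pv_prefix2_iff {cs : List Char} {d : Char} {j : Nat} :
    ([d, ' '].isPrefixOf (cs.drop j) = true) ↔ (cs[j]? = some d ∧ cs[j+1]? = some ' ') := by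
  rw [List.isPrefixOf_iff_prefix]
  constructor
  · rintro ⟨t, ht⟩
    have h0 : (cs.drop j)[0]? = some d := by rw [← ht]; rfl
    have h1 : (cs.drop j)[1]? = some ' ' := by rw [← ht]; rfl
    simp [List.getElem?_drop] at h0 h1
    exact ⟨h0, by simpa [Nat.add_comm] using h1⟩
  · rintro ⟨h0, h1⟩
    have hj : j < cs.length := (List.getElem?_eq_some_iff.mp h0).1
    have hj1 : j + 1 < cs.length := (List.getElem?_eq_some_iff.mp h1).1
    have : cs.drop j = d :: ' ' :: cs.drop (j + 2) := by
      apply List.ext_getElem?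
      intro i
      match i with
      | 0 => simpa [List.getElem?_drop] using h0
      | 1 => simpa [List.getElem?_drop, Nat.add_comm] using h1
      | (m + 2) => simp [List.getElem?_drop]; ring_nf
    rw [this]; exact ⟨cs.drop (j + 2), rfl⟩

-- one-character suffix ↔ last character
theorem pv_endswith_iff {cs : List Char} {d : Char} :
    ([d].isSuffixOf cs = true) ↔ (cs ≠ [] ∧ cs[cs.length - 1]? = some d) := by
  rw [List.isSuffixOf_iff_suffix]
  constructor
  · rintro ⟨t, ht⟩
    subst ht
    refine ⟨by simp, ?_⟩
    rw [List.length_append]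
    simp only [List.length_cons, List.length_nil]
    rw [List.getElem?_append_right (by omega)]
    simp
  · rintro ⟨hne, hd⟩
    have hlen : 0 < cs.length := List.length_pos_iff.mpr hne
    refine ⟨cs.dropLast, ?_⟩
    have : cs.getLast hne = d := by
      have := List.getLast_eq_getElem (l := cs) hne
      rw [List.getElem?_eq_some_iff] at hd
      rcases hd with ⟨h1, h2⟩
      rw [this, h2]
    rw [← this]
    exact (List.dropLast_append_getLast hne)

-- pvHit unfolded at an in-range index
theorem pv_hit_iff {cs : List Char} {i : Nat} (hi : i < cs.length) :
    pvHit cs i = true ↔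
      (∃ d ∈ pvEndings, cs[i]? = some d) ∧ (i + 1 = cs.length ∨ cs[i+1]? = some ' ') := by
  unfold pvHit
  have hget : cs.getD i ' ' = cs[i] := by
    simp [List.getD_eq_getElem?_getD, List.getElem?_eq_getElem hi]
  simp only [Bool.and_eq_true, List.contains_eq_mem, decide_eq_true_eq, Bool.or_eq_true,
    beq_iff_eq, hget]
  constructor
  · rintro ⟨h1, h2⟩
    refine ⟨⟨cs[i], by simpa [pvEndings] using h1, by simp [List.getElem?_eq_getElem hi]⟩, ?_⟩
    rcases h2 with h2 | h2
    · exact Or.inl h2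
    · by_cases he : i + 1 = cs.length
      · exact Or.inl he
      · right
        have hlt : i + 1 < cs.length := by omega
        simp [List.getD_eq_getElem?_getD, List.getElem?_eq_getElem hlt] at h2
        simp [List.getElem?_eq_getElem hlt, h2]
  · rintro ⟨⟨d, hd, hdi⟩, h2⟩
    have : cs[i] = d := by simp [List.getElem?_eq_getElem hi] at hdi; exact hdi
    refine ⟨by simpa [pvEndings, this] using hd, ?_⟩
    rcases h2 with h2 | h2
    · exact Or.inl h2
    · right
      have hlt : i + 1 < cs.length := (List.getElem?_eq_some_iff.mp h2).1
      simp [List.getElem?_eq_getElem hlt] at h2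
      simp [List.getD_eq_getElem?_getD, List.getElem?_eq_getElem hlt, h2]

-- pvScan characterisation
theorem pv_scan_none_iff {cs : List Char} {k : Nat} :
    pvScan cs k = none ↔ ∀ i < k, pvHit cs i = false := by
  induction k with
  | zero => simp [pvScan]
  | succ j ih =>
      simp only [pvScan]
      split
      · rename_i h
        simp only [reduceCtorEq, false_iff]
        intro hall
        exact absurd (hall j (by omega)) (by simp [h])
      · rename_i h
        rw [ih]
        constructor
        · intro hall i hi
          rcases Nat.lt_or_ge i j with h1 | h1
          · exact hall i h1
          · have : i = j := by omega
            subst this; simpa using h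
        · intro hall i hi; exact hall i (by omega)

theorem pv_scan_some_iff {cs : List Char} {k i : Nat} :
    pvScan cs k = some i ↔ i < k ∧ pvHit cs i = true ∧ ∀ j, i < j → j < k → pvHit cs j = false := by
  induction k with
  | zero => simp [pvScan]
  | succ m ih =>
      simp only [pvScan]
      split
      · rename_i h
        simp only [Option.some.injEq]
        constructor
        · rintro rfl
          exact ⟨by omega, h, fun j hj1 hj2 => absurd hj1 (by omega)⟩
        · rintro ⟨h1, h2, h3⟩
          by_contra hne
          have : i < m := by omega
          have := h3 m (by omega) (by omega)
          simp [h] at this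
      · rename_i h
        rw [ih]
        constructor
        · rintro ⟨h1, h2, h3⟩
          refine ⟨by omega, h2, ?_⟩
          intro j hj1 hj2
          rcases Nat.lt_or_ge j m with hl | hl
          · exact h3 j hj1 hl
          · have : j = m := by omega
            subst this; simpa using h
        · rintro ⟨h1, h2, h3⟩
          have him : i ≠ m := by
            rintro rfl; simp [h2] at h
          exact ⟨by omega, h2, fun j hj1 hj2 => h3 j hj1 (by omega)⟩

-- A's folded maximum, named
def pvLastEnd (cs : List Char) : Int :=
  pvEndings.foldl (fun last_end ending =>
    max (max last_end (PySem.Chars.rfind cs [ending, ' ']))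
      (if [ending].isSuffixOf cs then (cs.length : Int) - 1 else -1)) (-1)

theorem pv_foldl_max_le {l : List Char} {f : Char → Int} {a b : Int}
    (ha : a ≤ b) (hf : ∀ d ∈ l, f d ≤ b) :
    l.foldl (fun acc d => max acc (f d)) a ≤ b := by
  induction l generalizing a with
  | nil => simpa using ha
  | cons x xs ih =>
      simp only [List.foldl_cons]
      exact ih (max_le ha (hf x (by simp))) (fun d hd => hf d (by simp [hd]))

theorem pv_le_foldl_max {l : List Char} {f : Char → Int} {a : Int} :
    a ≤ l.foldl (fun acc d => max acc (f d)) a := by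
  induction l generalizing a with
  | nil => simp
  | cons x xs ih => exact le_trans (le_max_left a (f x)) ih

theorem pv_mem_le_foldl_max {l : List Char} {f : Char → Int} {a : Int} {d : Char}
    (hd : d ∈ l) : f d ≤ l.foldl (fun acc d => max acc (f d)) a := by
  induction l generalizing a with
  | nil => simp at hd
  | cons x xs ih =>
      simp only [List.foldl_cons]
      rcases List.mem_cons.mp hd with he | hd
      · subst he
        exact le_trans (le_max_right a (f d)) pv_le_foldl_max
      · exact ih hd

-- pvLastEnd as a max-fold of one function (the two inner maxes regrouped)
theorem pvLastEnd_eq (cs : List Char) :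
    pvLastEnd cs = pvEndings.foldl
      (fun acc d => max acc (max (PySem.Chars.rfind cs [d, ' '])
        (if [d].isSuffixOf cs then (cs.length : Int) - 1 else -1))) (-1) := by
  unfold pvLastEnd
  congr 1
  funext acc d
  rw [max_assoc]

-- the key bridge: pvLastEnd = the scan result (as an Int, -1 for none)
theorem pv_lastEnd_eq_scan (cs : List Char) :
    pvLastEnd cs = (match pvScan cs cs.length with
                    | some i => (i : Int)
                    | none => -1) := by
  rw [pvLastEnd_eq]
  set f : Char → Int := fun d => max (PySem.Chars.rfind cs [d, ' '])
      (if [d].isSuffixOf cs then (cs.length : Int) - 1 else -1) with hf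
  -- every candidate of f is a hit position
  have hcand : ∀ d ∈ pvEndings, ∀ j : Nat, f d = (j : Int) → 0 ≤ f d → pvHit cs j = true := by
    intro d hd j hj hpos
    rw [hf] at hj
    simp only at hj
    rcases max_cases (PySem.Chars.rfind cs [d, ' '])
        (if [d].isSuffixOf cs then (cs.length : Int) - 1 else -1) with ⟨he, _⟩ | ⟨he, _⟩ <;>
      rw [he] at hj
    · -- rfind found [d,' '] at j
      have hne : PySem.Chars.rfind cs [d, ' '] ≠ -1 := by
        rw [hj]; omega
      unfold PySem.Chars.rfind at hne hj
      rcases pv_go_spec hne with ⟨j', _, he', hp⟩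
      rw [he'] at hj
      have hjj : j' = j := by exact_mod_cast hj
      rw [hjj] at hp
      rcases pv_prefix2_iff.mp hp with ⟨h0, h1⟩
      have hj1 : j + 1 < cs.length := (List.getElem?_eq_some_iff.mp h1).1
      exact (pv_hit_iff (by omega)).mpr ⟨⟨d, hd, h0⟩, Or.inr h1⟩
    · -- endswith d: j = length - 1
      split at hj
      · rename_i hsuf
        rcases pv_endswith_iff.mp hsuf with ⟨hne, hlast⟩
        have hlen : 0 < cs.length := List.length_pos_iff.mpr hne
        have : j = cs.length - 1 := by omega
        subst this
        exact (pv_hit_iff (by omega)).mpr ⟨⟨d, hd, hlast⟩, Or.inl (by omega)⟩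
      · omega
  -- every hit position is reached by some candidate
  have hreach : ∀ j : Nat, pvHit cs j = true → j < cs.length →
      ∃ d ∈ pvEndings, (j : Int) ≤ f d := by
    intro j hit hj
    rcases (pv_hit_iff hj).mp hit with ⟨⟨d, hd, hdi⟩, hnext⟩
    refine ⟨d, hd, ?_⟩
    rw [hf]
    rcases hnext with hend | hsp
    · -- j = length - 1, endswith d
      have hsuf : [d].isSuffixOf cs = true := by
        rw [pv_endswith_iff]
        refine ⟨by rintro rfl; simp at hj, ?_⟩
        have : cs.length - 1 = j := by omega
        rw [this]; exact hdi
      simp only [hsuf, if_true]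
      have : (j : Int) ≤ (cs.length : Int) - 1 := by omega
      exact le_trans this (le_max_right _ _)
    · -- cs[j] = d, cs[j+1] = ' '
      have hp : [d, ' '].isPrefixOf (cs.drop j) = true := pv_prefix2_iff.mpr ⟨hdi, hsp⟩
      have := pv_go_ge (s := cs) (sub := [d, ' ']) (k := cs.length) (by omega) hp
      unfold PySem.Chars.rfind
      exact le_trans this (le_max_left _ _)
  -- f d ≤ scan result always
  cases hscan : pvScan cs cs.length with
  | none =>
      change _ = (-1 : Int)
      have hall := pv_scan_none_iff.mp hscan
      apply le_antisymm
      · apply pv_foldl_max_le (le_refl _)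
        intro d hd
        rcases (by omega : f d ≤ -1 ∨ -1 < f d) with hle | hgt
        · exact hle
        exfalso
        have hpos : 0 ≤ f d := by omega
        obtain ⟨j, hj⟩ : ∃ j : Nat, f d = (j : Int) := ⟨(f d).toNat, by omega⟩
        have hhit := hcand d hd j hj hpos
        have hjlt : j < cs.length := by
          have hb : f d ≤ (cs.length : Int) := by
            rw [hf]
            apply max_le
            · unfold PySem.Chars.rfind; exact pv_go_le
            · split <;> omega
          rw [hj] at hb hpos
          rcases Nat.lt_or_ge j cs.length with h | h
          · exact h
          · have : j = cs.length := by omega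
            subst this
            -- a hit at position length: impossible (getD default is ' ', not a delimiter)
            exfalso
            unfold pvHit at hhit
            simp [List.getD_eq_getElem?_getD, List.getElem?_eq_none (le_refl cs.length)] at hhit
        exact absurd hhit (by simp [hall j hjlt])
      · exact pv_le_foldl_max
  | some i =>
      change _ = ((i : Nat) : Int)
      have ⟨hik, hhit, habove⟩ := pv_scan_some_iff.mp hscan
      apply le_antisymm
      · apply pv_foldl_max_le (by omega)
        intro d hd
        rcases (by omega : f d ≤ ((i : Nat) : Int) ∨ ((i : Nat) : Int) < f d) with hle | hgt
        · exact hle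
        exfalso
        have hpos : 0 ≤ f d := by omega
        obtain ⟨j, hj⟩ : ∃ j : Nat, f d = (j : Int) := ⟨(f d).toNat, by omega⟩
        have hhitj := hcand d hd j hj hpos
        have hij : i < j := by omega
        have hjlt : j < cs.length := by
          have hb : f d ≤ (cs.length : Int) := by
            rw [hf]
            apply max_le
            · unfold PySem.Chars.rfind; exact pv_go_le
            · split <;> omega
          rw [hj] at hb
          rcases Nat.lt_or_ge j cs.length with h | h
          · exact h
          · have : j = cs.length := by omega
            subst this
            exfalso
            unfold pvHit at hhitj
            simp [List.getD_eq_getElem?_getD, List.getElem?_eq_none (le_refl cs.length)] at hhitj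
        exact absurd hhitj (by simp [habove j hij hjlt])
      · rcases hreach i hhit hik with ⟨d, hd, hle⟩
        exact le_trans hle (pv_mem_le_foldl_max hd)

-- ===== VERDICT (by name: the statement is the Claim_ definition above) =====
theorem extract_complete_sentences_spec : Claim_equal_extract_complete_sentences := by
  intro buffer _
  unfold Spec_extract_complete_sentences extract_complete_sentences extract_complete_sentences_alt
  simp only [PySem.Str.rfind_eq, PySem.Str.endswith_eq, PySem.Str.len_eq, PySem.Chars.endswith]
  have hfold : (pvEndings.foldl (fun last_end ending =>
      max (max last_end (PySem.Chars.rfind buffer.toList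
        (String.ofList [ending, ' ']).toList))
      (if (String.ofList [ending]).toList.isSuffixOf buffer.toList then
        (buffer.toList.length : Int) - 1 else -1)) (-1)) = pvLastEnd buffer.toList := by
    unfold pvLastEnd
    rfl
  rw [hfold, pv_lastEnd_eq_scan]
  cases hscan : pvScan buffer.toList buffer.toList.length with
  | none => simp
  | some i => simp
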